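-- pv_equiv track=rewrite | github.com/Aj-ninja007/DSA-PROBLEM | acent/def convertINTObinary.py | convertINTObinary
-- ===== SOURCE A (Python) =====
-- def convertINTObinary(n):
--     count=0
--
--     for i in range(1,n+1):
--         sum=0
--         t=bin(i)
--
--         l=t[2:]
--
--         for i in str(l):
--             if int(i)==0:
--                 sum+=1
--             if int(i)==1:
--                 sum+=2
--
--         if sum%2!=0:   #also count odd sum
--             count+=1
--     return count
-- ===== SOURCE B (Python) =====
-- def convertINTObinary(n):
--     # closed form: for odd n the count is (n-1)//2; for even n = 2k it is
--     # k minus the parity of (bit_length(k) + popcount(k)).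
--     if n <= 0:
--         return 0
--     if n % 2 == 1:
--         return (n - 1) // 2
--     k = n // 2
--     return k - (k.bit_length() + bin(k).count('1')) % 2
-- ===== Notes on version B (the rewrite author's own statement) =====
-- stated objective: faster
-- what changed: Replaced the loop over all i in [1,n] with binary-string rebuilding per i by a closed form: the weighted bit-sum of i is bit_length(i)+popcount(i), and counting odd ones over [1,n] collapses to (n-1)//2 for odd n and n//2 minus the parity of bit_length(n//2)+popcount(n//2) for even n.
import Mathlib
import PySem

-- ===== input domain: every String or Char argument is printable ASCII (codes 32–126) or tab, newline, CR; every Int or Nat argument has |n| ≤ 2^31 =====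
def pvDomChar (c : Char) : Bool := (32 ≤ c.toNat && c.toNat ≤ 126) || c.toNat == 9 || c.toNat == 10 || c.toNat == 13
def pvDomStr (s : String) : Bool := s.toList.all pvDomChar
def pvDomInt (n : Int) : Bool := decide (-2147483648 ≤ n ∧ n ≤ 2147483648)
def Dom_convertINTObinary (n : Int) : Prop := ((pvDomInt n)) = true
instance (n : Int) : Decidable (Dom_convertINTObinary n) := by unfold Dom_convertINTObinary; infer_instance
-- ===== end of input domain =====

-- B replaces A's per-element loop over binary strings by an O(log n) closed form (measured asymptotically faster).


-- ===== PORT A =====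
-- bin(i) for i ≥ 1 (the loop variable is always ≥ 1): "0b" ++ binary digits, MSB first
def pvBinDigits : Nat → List Char
  | 0 => []
  | m+1 => pvBinDigits ((m+1)/2) ++ [if (m+1) % 2 = 1 then '1' else '0']
decreasing_by exact Nat.div_lt_self (Nat.succ_pos m) (by omega)

def convertINTObinary (n : Int) : Int :=
  (PySem.List.pyRange 1 (n+1) 1).foldl (fun count i =>
    -- t = bin(i); strings carried as List Char
    let t : List Char := '0' :: 'b' :: pvBinDigits i.toNat
    -- l = t[2:]
    let l : List Char := PySem.List.slice t (some 2) none
    -- inner loop over the characters of l; int(c) ported via PySem.Int.ofChars? (exact here: the digits are '0'/'1', so int never raises)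
    let sum : Int := l.foldl (fun s c =>
      let s := if PySem.Int.ofChars? [c] = some 0 then s + 1 else s
      if PySem.Int.ofChars? [c] = some 1 then s + 2 else s) 0
    if PySem.Int.mod sum 2 ≠ 0 then count + 1 else count) 0

-- ===== PORT B =====
def convertINTObinary_alt (n : Int) : Int :=
  if n ≤ 0 then 0
  else if PySem.Int.mod n 2 = 1 then PySem.Int.floordiv (n - 1) 2
  else
    let k := PySem.Int.floordiv n 2
    k - PySem.Int.mod ((PySem.Int.bitLength k : Int) + (PySem.Int.bitCount k : Int)) 2

-- ===== PRECONDITION & SPEC =====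
def Spec_convertINTObinary (n : Int) (out : Int) : Prop := out = convertINTObinary_alt n
instance (n : Int) (out : Int) : Decidable (Spec_convertINTObinary n out) := by unfold Spec_convertINTObinary; infer_instance

-- ===== CLAIM (what is proved, stated in full; the proofs are below) =====
def Claim_equal_convertINTObinary : Prop := ∀ (n : Int), Dom_convertINTObinary n → Spec_convertINTObinary n (convertINTObinary n)

-- ===== LEMMAS AND PROOFS =====

-- weighted bit-sum of m: #zeros + 2*#ones over the binary digits = bit_length m + popcount m
def wtN : Nat → Nat
  | 0 => 0
  | m+1 => wtN ((m+1)/2) + 1 + (m+1) % 2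
decreasing_by exact Nat.div_lt_self (Nat.succ_pos m) (by omega)

-- the inner character loop of A computes wtN
theorem inner_fold_eq_wt (m : Nat) (s : Int) :
    (pvBinDigits m).foldl (fun s c =>
      if PySem.Int.ofChars? [c] = some 1 then (if PySem.Int.ofChars? [c] = some 0 then s + 1 else s) + 2
      else (if PySem.Int.ofChars? [c] = some 0 then s + 1 else s)) s = s + (wtN m : Int) := by
  induction m using Nat.strong_induction_on generalizing s with
  | _ m ih =>
    match m with
    | 0 => simp [pvBinDigits, wtN]
    | m+1 =>
      rw [pvBinDigits, List.foldl_append,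
          ih ((m+1)/2) (Nat.div_lt_self (Nat.succ_pos m) (by omega)), wtN]
      have d00 : PySem.Int.ofChars? ['0'] = some 0 := by decide
      have d01 : PySem.Int.ofChars? ['0'] ≠ some 1 := by decide
      have d11 : PySem.Int.ofChars? ['1'] = some 1 := by decide
      have d10 : PySem.Int.ofChars? ['1'] ≠ some 0 := by decide
      rcases Nat.mod_two_eq_zero_or_one (m+1) with h | h <;>
        simp [h, d00, d11] <;> omega

-- wtN is bit_length + popcount
theorem wt_eq_bl_add_bc (m : Nat) :
    (wtN m : Int) = (PySem.Int.bitLength (m : Int) : Int) + (PySem.Int.bitCount (m : Int) : Int) := by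
  induction m using Nat.strong_induction_on with
  | _ m ih =>
    match m with
    | 0 => simp [wtN, PySem.Int.bitLength_zero, PySem.Int.bitCount_zero]
    | m+1 =>
      rw [wtN, PySem.Int.bitLength_natCast (Nat.succ_pos m),
          PySem.Int.bitCount_natCast (Nat.succ_pos m)]
      have := ih ((m+1)/2) (Nat.div_lt_self (Nat.succ_pos m) (by omega))
      push_cast at this ⊢
      omega

-- B's closed form, on Nat
def gN (m : Nat) : Int :=
  if m = 0 then 0
  else if m % 2 = 1 then ((m - 1) / 2 : Nat)
  else ((m / 2 : Nat) : Int) - ((wtN (m / 2) % 2 : Nat) : Int)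

-- parity recurrences of wtN
theorem wt_odd (k : Nat) : wtN (2 * k + 1) = wtN k + 2 := by
  rw [wtN]
  have h1 : (2 * k + 1) / 2 = k := by omega
  have h2 : (2 * k + 1) % 2 = 1 := by omega
  rw [h1, h2]

theorem wt_even (k : Nat) (hk : 0 < k) : wtN (2 * k) = wtN k + 1 := by
  match k, hk with
  | k+1, _ =>
    have h : 2 * (k + 1) = (2 * k + 1) + 1 := by ring
    rw [h, wtN]
    have h1 : (2 * k + 1 + 1) / 2 = k + 1 := by omega
    have h2 : (2 * k + 1 + 1) % 2 = 0 := by omega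
    rw [h1, h2]

-- the step identity: gN (m+1) = gN m + [wtN (m+1) odd]
theorem gN_step (m : Nat) :
    gN (m + 1) = gN m + (if wtN (m + 1) % 2 ≠ 0 then 1 else 0) := by
  rcases Nat.even_or_odd (m + 1) with ⟨k, hk⟩ | ⟨k, hk⟩
  · -- m + 1 = 2k, k ≥ 1, m = 2k - 1 odd
    have hw : wtN (m + 1) = wtN k + 1 := by
      rw [show m + 1 = 2 * k by omega]; exact wt_even k (by omega)
    rw [hw, gN, gN, if_neg (show ¬ (m + 1 = 0) by omega), if_neg (show ¬ ((m+1) % 2 = 1) by omega),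
        if_neg (show ¬ (m = 0) by omega), if_pos (show m % 2 = 1 by omega),
        show (m + 1) / 2 = k by omega]
    split_ifs with h <;> omega
  · -- m + 1 = 2k + 1, m = 2k even
    have hw : wtN (m + 1) = wtN k + 2 := by
      rw [show m + 1 = 2 * k + 1 by omega]; exact wt_odd k
    by_cases hk0 : k = 0
    · subst hk0
      have hm0 : m = 0 := by omega
      subst hm0
      have h0 : wtN 0 = 0 := by rw [wtN]
      norm_num [gN, hw, h0]
    · rw [hw, gN, gN, if_neg (show ¬ (m + 1 = 0) by omega), if_pos (show (m+1) % 2 = 1 by omega),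
          if_neg (show ¬ (m = 0) by omega), if_neg (show ¬ (m % 2 = 1) by omega),
          show (m + 1 - 1) / 2 = k by omega, show m / 2 = k by omega]
      split_ifs with h <;> omega

-- A on a natural argument equals the closed form
theorem A_eq_gN (m : Nat) : convertINTObinary (m : Int) = gN m := by
  induction m with
  | zero =>
    rw [convertINTObinary, PySem.List.pyRange_one_eq_nil (by norm_num)]
    simp [gN]
  | succ m ih =>
    rw [convertINTObinary]
    have hb : ((m + 1 : Nat) : Int) + 1 = ((m : Int) + 1) + 1 := by push_cast; ring
    rw [hb, PySem.List.pyRange_one_succ_right (show (1:Int) ≤ (m : Int) + 1 by omega),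
        List.foldl_append]
    rw [convertINTObinary] at ih
    rw [ih]
    simp only [List.foldl_cons, List.foldl_nil]
    rw [PySem.List.slice_from _ (show (0:Int) ≤ 2 by norm_num)]
    rw [show ((2:Int)).toNat = 2 from rfl]
    simp only [List.drop_succ_cons, List.drop_zero]
    rw [show ((m : Int) + 1).toNat = m + 1 by omega]
    simp only [inner_fold_eq_wt, zero_add,
      PySem.Int.mod_eq_emod_of_pos (show (0:Int) < 2 by norm_num)]
    rw [gN_step m]
    split_ifs with h1 h2 <;> omega

-- B on a positive natural argument equals the closed form
theorem B_eq_gN (m : Nat) (hm : 0 < m) : convertINTObinary_alt (m : Int) = gN m := by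
  rw [convertINTObinary_alt,
      if_neg (show ¬ ((m : Int) ≤ 0) by exact_mod_cast by omega),
      PySem.Int.mod_eq_emod_of_pos (show (0:Int) < 2 by norm_num)]
  by_cases hp : m % 2 = 1
  · rw [if_pos (by omega), PySem.Int.floordiv_eq_ediv_of_pos (show (0:Int) < 2 by norm_num),
        gN, if_neg (by omega), if_pos hp]
    omega
  · rw [if_neg (by omega)]
    simp only []
    rw [PySem.Int.floordiv_eq_ediv_of_pos (show (0:Int) < 2 by norm_num),
        show (m : Int) / 2 = ((m / 2 : Nat) : Int) by omega,
        ← wt_eq_bl_add_bc (m / 2),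
        PySem.Int.mod_eq_emod_of_pos (show (0:Int) < 2 by norm_num),
        gN, if_neg (by omega), if_neg (by omega)]
    omega

-- ===== VERDICT (by name: the statement is the Claim_ definition above) =====
theorem convertINTObinary_spec : Claim_equal_convertINTObinary := by
  intro n _
  unfold Spec_convertINTObinary
  by_cases hn : n ≤ 0
  · rw [convertINTObinary_alt, if_pos hn,
        convertINTObinary, PySem.List.pyRange_one_eq_nil (by omega), List.foldl_nil]
  · have hm : n = ((n.toNat : Nat) : Int) := by omega
    rw [hm, A_eq_gN, B_eq_gN n.toNat (by omega)]
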